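-- pv_equiv track=rewrite | github.com/MrBrantCode/unitest_baseline | mut_generate/mist_train_taco/taco_9316/solution.py | can_run_all_trains
-- ===== SOURCE A (Python) =====
-- from collections import defaultdict
--
-- def can_run_all_trains(arrival_times, departure_times, days, number_of_platforms):
--     schedule = defaultdict(list)
--
--     # Populate the schedule dictionary with arrival and departure events
--     for day, atime, dtime in zip(days, arrival_times, departure_times):
--         schedule[day].extend([(atime, +1), (dtime, -1)])
--
--     max_occupancy = float('-inf')
--
--     # Process each day's schedule
--     for day_schedule in schedule.values():
--         day_schedule.sort()  # Sort events by time
--         current_occupancy = 0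
--
--         # Calculate the maximum occupancy for the day
--         for _, change in day_schedule:
--             current_occupancy += change
--             max_occupancy = max(max_occupancy, current_occupancy)
--
--     # Check if the maximum occupancy exceeds the number of platforms
--     return max_occupancy <= number_of_platforms
-- ===== SOURCE B (Python) =====
-- def can_run_all_trains(arrival_times, departure_times, days, number_of_platforms):
--     # Group each day's arrival and departure times separately, sort the two lists,
--     # and run a two-pointer merge: at each arrival, first release every platform
--     # whose departure time is <= that arrival (departures at equal times win the
--     # tie), then seat the train and record the occupancy i - j.
--     groups = {}
--     for d, a, t in zip(days, arrival_times, departure_times):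
--         groups.setdefault(d, []).append((a, t))
--     best = None
--     for pairs in groups.values():
--         arrs = sorted(a for a, _ in pairs)
--         deps = sorted(t for _, t in pairs)
--         i = 0
--         j = 0
--         for a in arrs:
--             while j < len(deps) and deps[j] <= a:
--                 j += 1
--             i += 1
--             occ = i - j
--             if best is None or occ > best:
--                 best = occ
--     return best is None or best <= number_of_platforms
-- ===== Notes on version B (the rewrite author's own statement) =====
-- stated objective: alternative
-- what changed: Replaces A's per-day merged (time, +/-1) event-tuple sort and signed running sweep by grouping each day's arrivals and departures into two independently sorted lists consumed by a two-pointer merge (departures at equal times are released first), recording occupancy i - j at each arrival.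
import Mathlib
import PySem

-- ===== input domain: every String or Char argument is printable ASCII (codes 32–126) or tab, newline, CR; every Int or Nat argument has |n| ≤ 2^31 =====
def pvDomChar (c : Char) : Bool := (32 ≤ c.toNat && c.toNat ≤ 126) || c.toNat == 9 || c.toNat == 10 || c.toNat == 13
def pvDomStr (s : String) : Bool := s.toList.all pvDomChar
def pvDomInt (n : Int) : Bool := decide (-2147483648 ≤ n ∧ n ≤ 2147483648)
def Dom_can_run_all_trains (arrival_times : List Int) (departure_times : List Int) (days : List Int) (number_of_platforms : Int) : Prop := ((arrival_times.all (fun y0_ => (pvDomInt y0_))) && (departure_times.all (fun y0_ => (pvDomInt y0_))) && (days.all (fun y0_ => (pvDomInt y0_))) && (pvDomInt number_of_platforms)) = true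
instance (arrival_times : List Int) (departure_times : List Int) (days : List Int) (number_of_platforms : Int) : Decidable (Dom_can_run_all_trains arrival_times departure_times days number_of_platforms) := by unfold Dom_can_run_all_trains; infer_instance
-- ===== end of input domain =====

-- B replaces A's per-day merged (time, +/-1) tuple sort and event sweep by two
-- independently sorted per-day lists (arrivals, departures) consumed by a
-- two-pointer merge; a genuinely different algorithm of the same asymptotic cost.

-- ===== PORT A =====
-- max(m, x) where m starts as float('-inf') (modelled as none)
def pvOptMax (m : Option Int) (x : Int) : Int :=
  match m with
  | none => x
  | some v => max v x

def can_run_all_trains (arrival_times : List Int) (departure_times : List Int) (days : List Int) (number_of_platforms : Int) : Bool :=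
  -- schedule = defaultdict(list); schedule[day].extend([(atime, +1), (dtime, -1)])
  let schedule : PySem.Dict Int (List (Int × Int)) :=
    (days.zip (arrival_times.zip departure_times)).foldl
      (fun sch t => sch.modify t.1 [] (fun l => l ++ [(t.2.1, 1), (t.2.2, -1)]))
      PySem.Dict.empty
  -- max_occupancy = float('-inf') … sweep each day's sorted schedule
  let maxOcc : Option Int :=
    schedule.values.foldl
      (fun m evs =>
        let evsS := PySem.List.sorted2 evs (fun p => p.1) (fun p => p.2)
        (evsS.foldl (fun (s : Int × Option Int) ev =>
            (s.1 + ev.2, some (pvOptMax s.2 (s.1 + ev.2)))) ((0 : Int), m)).2)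
      none
  match maxOcc with
  | none => true          -- float('-inf') <= number_of_platforms
  | some m => decide (m ≤ number_of_platforms)

-- ===== PORT B =====
-- while j < len(deps) and deps[j] <= a: j += 1
def pvAdvance (deps : List Int) (a : Int) (j : Nat) : Nat :=
  if h : j < deps.length then
    if deps[j] ≤ a then pvAdvance deps a (j + 1) else j
  else j
  termination_by deps.length - j

-- one day's two-pointer merge over the day's sorted arrivals and departures,
-- threading the global best (None = no train seen yet)
def pvDaySweep (pairs : List (Int × Int)) (best : Option Int) : Option Int :=
  let arrs := PySem.List.sorted (pairs.map (fun p => p.1)) (fun x => x)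
  let deps := PySem.List.sorted (pairs.map (fun p => p.2)) (fun x => x)
  (arrs.foldl
    (fun (s : Nat × Nat × Option Int) a =>
      let j := pvAdvance deps a s.2.1
      (s.1 + 1, j, some (pvOptMax s.2.2 ((s.1 : Int) + 1 - (j : Int)))))
    (0, 0, best)).2.2

def can_run_all_trains_alt (arrival_times : List Int) (departure_times : List Int) (days : List Int) (number_of_platforms : Int) : Bool :=
  let trains := days.zip (arrival_times.zip departure_times)
  -- groups.setdefault(d, []).append((a, t))
  let groups : PySem.Dict Int (List (Int × Int)) :=
    trains.foldl (fun g t => g.modify t.1 [] (fun l => l ++ [t.2])) PySem.Dict.empty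
  let best := groups.values.foldl (fun b pairs => pvDaySweep pairs b) none
  match best with
  | none => true          -- no trains
  | some b => decide (b ≤ number_of_platforms)

-- ===== PRECONDITION & SPEC =====
def Spec_can_run_all_trains (arrival_times : List Int) (departure_times : List Int) (days : List Int) (number_of_platforms : Int) (out : Bool) : Prop := out = can_run_all_trains_alt arrival_times departure_times days number_of_platforms
instance (arrival_times : List Int) (departure_times : List Int) (days : List Int) (number_of_platforms : Int) (out : Bool) : Decidable (Spec_can_run_all_trains arrival_times departure_times days number_of_platforms out) := by unfold Spec_can_run_all_trains; infer_instance

-- ===== CLAIM (what is proved, stated in full; the proofs are below) =====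
def Claim_equal_can_run_all_trains : Prop := ∀ (arrival_times : List Int) (departure_times : List Int) (days : List Int) (number_of_platforms : Int), Dom_can_run_all_trains arrival_times departure_times days number_of_platforms → Spec_can_run_all_trains arrival_times departure_times days number_of_platforms (can_run_all_trains arrival_times departure_times days number_of_platforms)

-- ===== LEMMAS AND PROOFS =====

-- ---- proof-side vocabulary ----

-- the strict tuple comparison sorted2 uses for key pair (fst, snd)
def pvLtB (a b : Int × Int) : Bool :=
  decide (a.1 < b.1) || (!decide (b.1 < a.1) && decide (a.2 < b.2))

-- lexicographic ≤ on the event pairs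
def pvLe (a b : Int × Int) : Prop := a.1 < b.1 ∨ (a.1 = b.1 ∧ a.2 ≤ b.2)

-- the event list A builds for one day's trains
def pvEvents (L : List (Int × Int × Int)) : List (Int × Int) :=
  L.flatMap (fun t => [(t.2.1, 1), (t.2.2, -1)])

-- occupancy just after time u within the day whose trains are L
def pvG (L : List (Int × Int × Int)) (u : Int) : Int :=
  (L.countP (fun t => decide (t.2.1 ≤ u)) : Int) - (L.countP (fun t => decide (t.2.2 ≤ u)) : Int)

-- max over nonempty prefixes P of cs of (x + P.sum)
def pvMps (x : Int) : List Int → Int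
  | [] => x
  | [c] => x + c
  | c :: c' :: cs => max (x + c) (pvMps (x + c) (c' :: cs))

-- A's per-day sweep value
def pvDayMax (L : List (Int × Int × Int)) : Int :=
  pvMps 0 ((PySem.List.sorted2 (pvEvents L) (fun p => p.1) (fun p => p.2)).map (fun p => p.2))

-- ---- pvLe / pvLtB basics ----

theorem pvLe_trans {a b c : Int × Int} (h1 : pvLe a b) (h2 : pvLe b c) : pvLe a c := by
  unfold pvLe at *; omega

theorem pvLe_of_not_ltB {a b : Int × Int} (h : pvLtB b a = false) : pvLe a b := by
  unfold pvLtB at h; unfold pvLe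
  simp only [Bool.or_eq_false_iff, Bool.and_eq_false_iff, Bool.not_eq_false',
    decide_eq_false_iff_not, decide_eq_true_eq, not_lt] at h
  omega

theorem pvLe_of_ltB {a b : Int × Int} (h : pvLtB a b = true) : pvLe a b := by
  unfold pvLtB at h; unfold pvLe
  simp only [Bool.or_eq_true, Bool.and_eq_true, Bool.not_eq_true',
    decide_eq_false_iff_not, decide_eq_true_eq, not_lt] at h
  omega

-- ---- sorted2 is sorted w.r.t. pvLe ----

theorem insertBy_pairwise (x : Int × Int) (ys : List (Int × Int))
    (h : ys.Pairwise pvLe) : (PySem.List.insertBy pvLtB x ys).Pairwise pvLe := by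
  induction ys with
  | nil => simp [PySem.List.insertBy]
  | cons y ys ih =>
    rw [List.pairwise_cons] at h
    by_cases hb : pvLtB x y = true
    · show (if pvLtB x y = true then x :: y :: ys else
          y :: PySem.List.insertBy pvLtB x ys).Pairwise pvLe
      rw [if_pos hb]
      refine List.pairwise_cons.mpr ⟨?_, List.pairwise_cons.mpr ⟨h.1, h.2⟩⟩
      intro z hz
      rcases List.mem_cons.mp hz with h1 | h1
      · subst h1; exact pvLe_of_ltB hb
      · exact pvLe_trans (pvLe_of_ltB hb) (h.1 z h1)
    · show (if pvLtB x y = true then x :: y :: ys else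
          y :: PySem.List.insertBy pvLtB x ys).Pairwise pvLe
      rw [if_neg hb]
      refine List.pairwise_cons.mpr ⟨?_, ih h.2⟩
      intro z hz
      rcases (PySem.List.mem_insertBy pvLtB x z ys).mp hz with h1 | h1
      · subst h1; exact pvLe_of_not_ltB (by simpa using hb)
      · exact h.1 z h1

theorem sorted2_pairwise_pvLe (xs : List (Int × Int)) :
    (PySem.List.sorted2 xs (fun p => p.1) (fun p => p.2) false).Pairwise pvLe := by
  have : PySem.List.sorted2 xs (fun p => p.1) (fun p => p.2) false
      = xs.foldl (fun acc x => PySem.List.insertBy pvLtB x acc) [] := rfl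
  rw [this]
  have key : ∀ (l : List (Int × Int)) (acc : List (Int × Int)), acc.Pairwise pvLe →
      (l.foldl (fun acc x => PySem.List.insertBy pvLtB x acc) acc).Pairwise pvLe := by
    intro l
    induction l with
    | nil => intro acc h; simpa using h
    | cons x l ih => intro acc h; exact ih _ (insertBy_pairwise x acc h)
  exact key xs [] List.Pairwise.nil

-- ---- events ----

theorem mem_pvEvents {L : List (Int × Int × Int)} {e : Int × Int} (h : e ∈ pvEvents L) :
    ∃ t ∈ L, e = (t.2.1, 1) ∨ e = (t.2.2, -1) := by
  unfold pvEvents at h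
  simp only [List.mem_flatMap, List.mem_cons] at h
  obtain ⟨t, ht, he⟩ := h
  exact ⟨t, ht, by tauto⟩

theorem pvEvents_arrival_mem {L : List (Int × Int × Int)} {t : Int × Int × Int} (h : t ∈ L) :
    ((t.2.1, 1) : Int × Int) ∈ pvEvents L := by
  unfold pvEvents
  simp only [List.mem_flatMap]
  exact ⟨t, h, by simp⟩

theorem pvEvents_ne_nil {L : List (Int × Int × Int)} (h : L ≠ []) : pvEvents L ≠ [] := by
  obtain ⟨t, ht⟩ := List.exists_mem_of_ne_nil L h
  exact List.ne_nil_of_mem (pvEvents_arrival_mem ht)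

theorem snd_pvEvents {L : List (Int × Int × Int)} {e : Int × Int} (h : e ∈ pvEvents L) :
    e.2 = 1 ∨ e.2 = -1 := by
  obtain ⟨t, _, he | he⟩ := mem_pvEvents h <;> subst he <;> simp

-- sum of changes of the events at or before time u = pvG
theorem sum_filter_pvEvents (L : List (Int × Int × Int)) (u : Int) :
    (((pvEvents L).filter (fun p => decide (p.1 ≤ u))).map (fun p => p.2)).sum = pvG L u := by
  induction L with
  | nil => simp [pvEvents, pvG]
  | cons t L ih =>
    have hcons : pvEvents (t :: L) = [(t.2.1, 1), (t.2.2, -1)] ++ pvEvents L := rfl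
    rw [hcons]
    rw [List.filter_append, List.map_append, List.sum_append, ih]
    unfold pvG
    simp only [List.countP_cons]
    by_cases h1 : t.2.1 ≤ u <;> by_cases h2 : t.2.2 ≤ u <;>
      simp [h1, h2] <;> ring

-- ---- pvMps: max over nonempty prefixes ----

theorem pvMps_ge (P Q : List Int) (x : Int) (hP : P ≠ []) :
    x + P.sum ≤ pvMps x (P ++ Q) := by
  induction P generalizing x with
  | nil => exact absurd rfl hP
  | cons c P ih =>
    by_cases hP' : P = []
    · subst hP'
      cases Q with
      | nil => simp [pvMps]
      | cons q Q => simp only [List.nil_append, List.cons_append, List.sum_cons,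
          List.sum_nil, pvMps]; omega
    · obtain ⟨p, P', rfl⟩ : ∃ p P', P = p :: P' := by
        cases P with
        | nil => exact absurd rfl hP'
        | cons p P' => exact ⟨p, P', rfl⟩
      have hstep : pvMps x ((c :: p :: P') ++ Q) = max (x + c) (pvMps (x + c) ((p :: P') ++ Q)) := by
        simp [pvMps]
      rw [hstep]
      have := ih (x + c) hP'
      simp only [List.sum_cons] at *
      omega

theorem pvMps_att (cs : List Int) (x : Int) (h : cs ≠ []) :
    ∃ P Q, cs = P ++ Q ∧ P ≠ [] ∧ pvMps x cs = x + P.sum := by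
  induction cs generalizing x with
  | nil => exact absurd rfl h
  | cons c cs ih =>
    by_cases hcs : cs = []
    · subst hcs
      exact ⟨[c], [], rfl, by simp, by simp [pvMps]⟩
    · obtain ⟨q, cs', rfl⟩ : ∃ q cs', cs = q :: cs' := by
        cases cs with
        | nil => exact absurd rfl hcs
        | cons q cs' => exact ⟨q, cs', rfl⟩
      have hm : pvMps x (c :: q :: cs') = max (x + c) (pvMps (x + c) (q :: cs')) := by
        simp [pvMps]
      obtain ⟨P, Q, hPQ, hPne, hval⟩ := ih (x + c) hcs
      rcases le_total (pvMps (x + c) (q :: cs')) (x + c) with hle | hle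
      · exact ⟨[c], q :: cs', rfl, by simp, by rw [hm]; simp; omega⟩
      · refine ⟨c :: P, Q, by simp [hPQ], by simp, ?_⟩
        rw [hm, max_eq_right hle, hval]
        simp only [List.sum_cons]; omega

-- ---- prefix bounds on the sorted event list ----

-- some train's pvG is ≥ 0 (the one with the latest arrival)
theorem pvG_exists_nonneg (L : List (Int × Int × Int)) (h : L ≠ []) :
    ∃ t ∈ L, 0 ≤ pvG L (t.2.1) := by
  obtain ⟨m, hm⟩ : ∃ m, PySem.List.max? L (fun t => t.2.1) = some m := by
    rcases hEq : PySem.List.max? L (fun t => t.2.1) with _ | m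
    · exact absurd ((PySem.List.max?_eq_none_iff L _).mp hEq) h
    · exact ⟨m, rfl⟩
  refine ⟨m, PySem.List.max?_mem hm, ?_⟩
  have hmax := PySem.List.max?_isMax hm
  unfold pvG
  have h1 : L.countP (fun t => decide (t.2.1 ≤ m.2.1)) = L.length :=
    List.countP_eq_length.mpr (fun t ht => by simpa using hmax t ht)
  have h2 : L.countP (fun t => decide (t.2.2 ≤ m.2.1)) ≤ L.length := List.countP_le_length
  rw [h1]
  omega

-- a prefix ending in an arrival event is bounded by the filtered sum
theorem prefix_le_filter (S P' Q : List (Int × Int)) (e : Int × Int)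
    (hS : S = (P' ++ [e]) ++ Q) (hpw : S.Pairwise pvLe)
    (hsnd : ∀ x ∈ S, x.2 = 1 ∨ x.2 = -1) (he : e.2 = 1) :
    (((P' ++ [e]).map (fun p => p.2)).sum)
      ≤ ((S.filter (fun q => decide (q.1 ≤ e.1))).map (fun p => p.2)).sum := by
  subst hS
  have hpw' := hpw
  rw [List.pairwise_append] at hpw'
  obtain ⟨hpwP, hpwQ, hcross⟩ := hpw'
  have hPfilter : (P' ++ [e]).filter (fun q => decide (q.1 ≤ e.1)) = P' ++ [e] := by
    apply List.filter_eq_self.mpr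
    intro a ha
    rcases List.mem_append.mp ha with ha | ha
    · have : pvLe a e := by
        rw [List.pairwise_append] at hpwP
        exact hpwP.2.2 a ha e (List.mem_singleton_self e)
      simp only [decide_eq_true_eq]
      unfold pvLe at this; omega
    · rw [List.mem_singleton] at ha; subst ha; simp
  have : 0 ≤ ((Q.filter (fun q => decide (q.1 ≤ e.1))).map (fun p => p.2)).sum := by
    apply List.sum_nonneg
    intro v hv
    rw [List.mem_map] at hv
    obtain ⟨x, hx, hxv⟩ := hv
    rw [List.mem_filter] at hx
    obtain ⟨hxQ, hxle⟩ := hx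
    have hex : pvLe e x := hcross e (by simp) x hxQ
    have hx1 : x.1 ≤ e.1 := by simpa using hxle
    have : x.2 = 1 := by
      unfold pvLe at hex
      have := hsnd x (by simp [hxQ])
      omega
    omega
  rw [List.filter_append, hPfilter]
  simp only [List.map_append, List.sum_append]
  omega

-- every nonempty prefix of the sorted event list is ≤ some train's pvG
theorem prefix_le_pvG (L : List (Int × Int × Int)) (hL : L ≠ [])
    (S : List (Int × Int)) (hperm : S.Perm (pvEvents L)) (hpw : S.Pairwise pvLe) :
    ∀ P Q : List (Int × Int), S = P ++ Q → P ≠ [] →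
      ∃ t ∈ L, ((P.map (fun p => p.2)).sum) ≤ pvG L (t.2.1) := by
  intro P
  induction P using List.reverseRecOn with
  | nil => intro Q _ hne; exact absurd rfl hne
  | append_singleton P' e ih =>
    intro Q hS _
    have hsnd : ∀ x ∈ S, x.2 = 1 ∨ x.2 = -1 := fun x hx => snd_pvEvents (hperm.mem_iff.mp hx)
    have heS : e ∈ S := by rw [hS]; simp
    rcases hsnd e heS with he1 | he1
    · -- ends in an arrival: bounded by the filtered sum = pvG at that arrival time
      obtain ⟨t, htL, hte⟩ : ∃ t ∈ L, e = (t.2.1, 1) ∨ e = (t.2.2, -1) :=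
        mem_pvEvents (hperm.mem_iff.mp heS)
      have hte1 : e.1 = t.2.1 := by
        rcases hte with h' | h'
        · rw [h']
        · exfalso; rw [h'] at he1; simp at he1
      refine ⟨t, htL, ?_⟩
      have hb := prefix_le_filter S P' Q e hS hpw hsnd he1
      have hfs : ((S.filter (fun q => decide (q.1 ≤ e.1))).map (fun p => p.2)).sum
          = pvG L e.1 := by
        rw [← sum_filter_pvEvents L e.1]
        exact List.Perm.sum_eq (List.Perm.map _ (List.Perm.filter _ hperm))
      rw [hte1] at hfs hb
      omega
    · -- ends in a departure: drop it
      by_cases hP' : P' = []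
      · subst hP'
        obtain ⟨t, htL, ht⟩ := pvG_exists_nonneg L hL
        refine ⟨t, htL, ?_⟩
        simp only [List.nil_append, List.map_cons, List.map_nil, List.sum_cons, List.sum_nil]
        omega
      · obtain ⟨t, htL, ht⟩ := ih (e :: Q) (by rw [hS]; simp) hP'
        refine ⟨t, htL, ?_⟩
        rw [List.map_append, List.sum_append]
        simp only [List.map_cons, List.map_nil, List.sum_cons, List.sum_nil]
        omega

-- ---- takeWhile = filter on a sorted list ----

theorem takeWhile_eq_filter_sorted (p : Int × Int → Bool)
    (hmono : ∀ a b : Int × Int, pvLe a b → p b = true → p a = true) :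
    ∀ S : List (Int × Int), S.Pairwise pvLe → S.takeWhile p = S.filter p := by
  intro S
  induction S with
  | nil => intro _; rfl
  | cons x S ih =>
    intro hpw
    rw [List.pairwise_cons] at hpw
    by_cases hx : p x = true
    · rw [List.takeWhile_cons_of_pos hx, List.filter_cons_of_pos hx, ih hpw.2]
    · rw [List.takeWhile_cons_of_neg hx, List.filter_cons_of_neg hx]
      have : S.filter p = [] := by
        apply List.filter_eq_nil_iff.mpr
        intro a ha hpa
        exact hx (hmono x a (hpw.1 a ha) hpa)
      rw [this]

-- ---- per-day characterisation ----

theorem pvDayMax_ge (L : List (Int × Int × Int)) :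
    ∀ t ∈ L, pvG L (t.2.1) ≤ pvDayMax L := by
  intro t ht
  set S := PySem.List.sorted2 (pvEvents L) (fun p => p.1) (fun p => p.2) false with hSdef
  have hperm : S.Perm (pvEvents L) := PySem.List.sorted2_perm _ _ _ _
  have hpw : S.Pairwise pvLe := sorted2_pairwise_pvLe _
  set p : Int × Int → Bool := fun q => decide (q.1 ≤ t.2.1) with hp
  have hmono : ∀ a b : Int × Int, pvLe a b → p b = true → p a = true := by
    intro a b hab hb
    simp only [hp, decide_eq_true_eq] at *
    unfold pvLe at hab; omega
  have htw : S.takeWhile p = S.filter p := takeWhile_eq_filter_sorted p hmono S hpw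
  have hmem : ((t.2.1, 1) : Int × Int) ∈ S.filter p := by
    rw [List.mem_filter]
    exact ⟨hperm.mem_iff.mpr (pvEvents_arrival_mem ht), by simp [hp]⟩
  have hne : S.takeWhile p ≠ [] := by rw [htw]; exact List.ne_nil_of_mem hmem
  have hsplit : S = S.takeWhile p ++ S.dropWhile p := (List.takeWhile_append_dropWhile).symm
  have hsum : ((S.takeWhile p).map (fun q => q.2)).sum = pvG L (t.2.1) := by
    rw [htw, ← sum_filter_pvEvents L (t.2.1)]
    exact List.Perm.sum_eq (List.Perm.map _ (List.Perm.filter _ hperm))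
  have hmapsplit : S.map (fun q => q.2)
      = (S.takeWhile p).map (fun q => q.2) ++ (S.dropWhile p).map (fun q => q.2) := by
    conv_lhs => rw [hsplit]
    rw [List.map_append]
  have hge := pvMps_ge ((S.takeWhile p).map (fun q => q.2))
      ((S.dropWhile p).map (fun q => q.2)) 0 (by simpa using hne)
  rw [← hmapsplit] at hge
  unfold pvDayMax
  rw [← hSdef, ← hsum]
  omega

theorem pvDayMax_le (L : List (Int × Int × Int)) (hL : L ≠ []) :
    ∃ t ∈ L, pvDayMax L ≤ pvG L (t.2.1) := by
  set S := PySem.List.sorted2 (pvEvents L) (fun p => p.1) (fun p => p.2) false with hSdef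
  have hperm : S.Perm (pvEvents L) := PySem.List.sorted2_perm _ _ _ _
  have hpw : S.Pairwise pvLe := sorted2_pairwise_pvLe _
  have hEne : pvEvents L ≠ [] := pvEvents_ne_nil hL
  have hSne : S ≠ [] := by
    intro h
    have hlen := hperm.length_eq
    rw [h] at hlen
    exact hEne (List.eq_nil_of_length_eq_zero hlen.symm)
  obtain ⟨P, Q, hPQ, hPne, hval⟩ := pvMps_att (S.map (fun q => q.2)) 0 (by simpa using hSne)
  obtain ⟨P₁, Q₁, hS, hmapP, hmapQ⟩ := List.map_eq_append_iff.mp hPQ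
  have hP₁ne : P₁ ≠ [] := by
    intro h; subst h; simp only [List.map_nil] at hmapP; exact hPne hmapP.symm
  obtain ⟨t, htL, ht⟩ := prefix_le_pvG L hL S hperm hpw P₁ Q₁ hS hP₁ne
  refine ⟨t, htL, ?_⟩
  have hDM : pvDayMax L = 0 + P.sum := by unfold pvDayMax; rw [← hSdef]; exact hval
  rw [hDM, ← hmapP]
  omega

-- ---- the schedule dict ----

-- the trains of day c, in input order
def pvLc (T : List (Int × Int × Int)) (c : Int) : List (Int × Int × Int) :=
  T.filter (fun t => t.1 == c)

theorem mem_pvLc_iff {T : List (Int × Int × Int)} {c : Int} {t : Int × Int × Int} :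
    t ∈ pvLc T c ↔ t ∈ T ∧ t.1 = c := by
  simp [pvLc, List.mem_filter]

theorem sched_getD (T : List (Int × Int × Int)) :
    ∀ (d : PySem.Dict Int (List (Int × Int))) (c : Int),
    (T.foldl (fun sch t => sch.modify t.1 [] (fun l => l ++ [(t.2.1, 1), (t.2.2, -1)])) d).getD c []
      = d.getD c [] ++ pvEvents (pvLc T c) := by
  induction T with
  | nil => intro d c; simp [pvLc, pvEvents]
  | cons t T ih =>
    intro d c
    rw [List.foldl_cons, ih]
    rw [PySem.Dict.getD_modify]
    have hLc : pvLc (t :: T) c = if t.1 == c then t :: pvLc T c else pvLc T c := by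
      simp [pvLc, List.filter_cons]
    by_cases hc : c = t.1
    · subst hc
      rw [if_pos rfl, hLc, if_pos (by simp)]
      have : pvEvents (t :: pvLc T t.1) = [(t.2.1, 1), (t.2.2, -1)] ++ pvEvents (pvLc T t.1) := rfl
      rw [this, ← List.append_assoc]
    · rw [if_neg hc, hLc, if_neg (by simp [Ne.symm hc])]

theorem sched_keys (T : List (Int × Int × Int)) :
    (T.foldl (fun sch t => sch.modify t.1 [] (fun l => l ++ [(t.2.1, 1), (t.2.2, -1)]))
        (PySem.Dict.empty : PySem.Dict Int (List (Int × Int)))).keys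
      = PySem.Set.ofList (T.map (fun t => t.1)) := by
  rw [PySem.Dict.keys_foldl_modify_key T (fun t => t.1) []
      (fun _ t => fun l => l ++ [(t.2.1, 1), (t.2.2, -1)]) PySem.Dict.empty]
  rw [PySem.Dict.keys_empty, PySem.Set.update_nil_left]

theorem sched_nodup (T : List (Int × Int × Int)) :
    (T.foldl (fun sch t => sch.modify t.1 [] (fun l => l ++ [(t.2.1, 1), (t.2.2, -1)]))
        (PySem.Dict.empty : PySem.Dict Int (List (Int × Int)))).keys.Nodup :=
  PySem.Dict.nodup_keys_foldl_modify_key T (fun t => t.1) []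
    (fun _ t => fun l => l ++ [(t.2.1, 1), (t.2.2, -1)]) PySem.Dict.empty PySem.Dict.nodup_keys_empty

-- ---- the sweep folds ----

theorem pvOptMax_assoc (m : Option Int) (a b : Int) :
    pvOptMax (some (pvOptMax m a)) b = pvOptMax m (max a b) := by
  cases m with
  | none => rfl
  | some v => simp [pvOptMax, max_assoc]

theorem inner_shape :
    ∀ (evs : List (Int × Int)) (x : Int) (m : Option Int),
    (evs.foldl (fun (s : Int × Option Int) ev =>
        (s.1 + ev.2, some (pvOptMax s.2 (s.1 + ev.2)))) (x, m)).2
      = if evs = [] then m else some (pvOptMax m (pvMps x (evs.map (fun p => p.2)))) := by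
  intro evs
  induction evs with
  | nil => intro x m; rfl
  | cons e evs ih =>
    intro x m
    rw [List.foldl_cons, ih]
    by_cases hevs : evs = []
    · subst hevs; simp [pvMps]
    · rw [if_neg hevs, if_neg (by simp)]
      obtain ⟨q, evs', rfl⟩ : ∃ q evs', evs = q :: evs' := by
        cases evs with
        | nil => exact absurd rfl hevs
        | cons q evs' => exact ⟨q, evs', rfl⟩
      have : pvMps x (e.2 :: q.2 :: (evs'.map (fun p => p.2)))
          = max (x + e.2) (pvMps (x + e.2) (q.2 :: evs'.map (fun p => p.2))) := by
        simp [pvMps]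
      simp only [List.map_cons] at *
      rw [this, pvOptMax_assoc]

theorem ofold_spec (h : Int → Int) :
    ∀ (Ds : List Int) (m0 : Option Int), Ds ≠ [] →
    ∃ r, Ds.foldl (fun m c => some (pvOptMax m (h c))) m0 = some r
      ∧ (∀ c ∈ Ds, h c ≤ r) ∧ (∀ v, m0 = some v → v ≤ r)
      ∧ ((∃ c ∈ Ds, r = h c) ∨ m0 = some r) := by
  intro Ds
  induction Ds with
  | nil => intro m0 hne; exact absurd rfl hne
  | cons c Ds ih =>
    intro m0 _
    by_cases hDs : Ds = []
    · subst hDs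
      refine ⟨pvOptMax m0 (h c), rfl, ?_, ?_, ?_⟩
      · intro c' hc'
        rw [List.mem_singleton] at hc'
        subst hc'
        cases m0 <;> simp [pvOptMax]
      · intro v hv; subst hv; simp [pvOptMax]
      · cases m0 with
        | none => exact Or.inl ⟨c, by simp, rfl⟩
        | some v =>
          rcases le_total (h c) v with hle | hle
          · exact Or.inr (by simp [pvOptMax, max_eq_left hle])
          · exact Or.inl ⟨c, by simp, by simp [pvOptMax, max_eq_right hle]⟩
    · obtain ⟨r, hfold, hbound, hm0, hatt⟩ := ih (some (pvOptMax m0 (h c))) hDs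
      refine ⟨r, by rw [List.foldl_cons]; exact hfold, ?_, ?_, ?_⟩
      · intro c' hc'
        rcases List.mem_cons.mp hc' with h1 | h1
        · have h2 := hm0 (pvOptMax m0 (h c)) rfl
          have h3 : h c' ≤ pvOptMax m0 (h c) := by rw [h1]; cases m0 <;> simp [pvOptMax]
          omega
        · exact hbound c' h1
      · intro v hv
        have h2 := hm0 (pvOptMax m0 (h c)) rfl
        have h3 : v ≤ pvOptMax m0 (h c) := by subst hv; simp [pvOptMax]
        omega
      · rcases hatt with ⟨c', hc', hr⟩ | hr
        · exact Or.inl ⟨c', List.mem_cons_of_mem _ hc', hr⟩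
        · have hreq : r = pvOptMax m0 (h c) := by
            injection hr with h'; exact h'.symm
          cases m0 with
          | none => exact Or.inl ⟨c, by simp, hreq⟩
          | some v =>
            rcases le_total (h c) v with hle | hle
            · exact Or.inr (by rw [hreq]; simp [pvOptMax, max_eq_left hle])
            · exact Or.inl ⟨c, by simp, by rw [hreq]; simp [pvOptMax, max_eq_right hle]⟩

-- ---- B's two-pointer sweep ----

-- number of elements of xs that are ≤ u
def pvCnt (xs : List Int) (u : Int) : Nat := xs.countP (fun x => decide (x ≤ u))

-- value of B's merge over the remaining sorted arrivals, i of them already done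
def pvTP (sd : List Int) (i : Int) : List Int → Int
  | [] => i
  | [a] => i + 1 - (pvCnt sd a : Int)
  | a :: a' :: rest => max (i + 1 - (pvCnt sd a : Int)) (pvTP sd (i + 1) (a' :: rest))

-- B's per-day value
def pvDayB (pairs : List (Int × Int)) : Int :=
  pvTP (PySem.List.sorted (pairs.map (fun p => p.2)) (fun x => x)) 0
    (PySem.List.sorted (pairs.map (fun p => p.1)) (fun x => x))

theorem pvCnt_mono (xs : List Int) {u v : Int} (h : u ≤ v) : pvCnt xs u ≤ pvCnt xs v :=
  List.countP_mono_left (by intro x _ hx; simp only [decide_eq_true_eq] at *; omega)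

theorem count_sorted_getElem (a : Int) :
    ∀ (ds : List Int), ds.Pairwise (· ≤ ·) → ∀ k, (hk : k < ds.length) →
      (ds[k] ≤ a ↔ k < pvCnt ds a) := by
  intro ds
  induction ds with
  | nil => intro _ k hk; simp at hk
  | cons d ds ih =>
    intro hpw k hk
    rw [List.pairwise_cons] at hpw
    have hcnt : pvCnt (d :: ds) a = pvCnt ds a + (if d ≤ a then 1 else 0) := by
      simp [pvCnt, List.countP_cons]
    cases k with
    | zero =>
      simp only [List.getElem_cons_zero]
      constructor
      · intro h; rw [hcnt]; simp [h]
      · intro h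
        by_contra hda
        have hz : pvCnt ds a = 0 := by
          apply List.countP_eq_zero.mpr
          intro x hx
          have := hpw.1 x hx
          simp only [decide_eq_true_eq]
          omega
        rw [hcnt, hz, if_neg hda] at h
        simp at h
    | succ k =>
      simp only [List.getElem_cons_succ]
      have hk' : k < ds.length := by simpa using hk
      rw [ih hpw.2 k hk', hcnt]
      by_cases hda : d ≤ a
      · simp [hda]
      · have hz : ¬ ds[k] ≤ a := by
          have := hpw.1 ds[k] (List.getElem_mem hk')
          omega
        have hz' : pvCnt ds a = 0 := by
          apply List.countP_eq_zero.mpr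
          intro x hx
          have := hpw.1 x hx
          simp only [decide_eq_true_eq]
          omega
        simp [hda, hz']

theorem pvAdvance_eq (ds : List Int) (hpw : ds.Pairwise (· ≤ ·)) (a : Int) :
    ∀ j, j ≤ pvCnt ds a → pvAdvance ds a j = pvCnt ds a := by
  have hle : pvCnt ds a ≤ ds.length := List.countP_le_length
  suffices H : ∀ n j, ds.length - j ≤ n → j ≤ pvCnt ds a → pvAdvance ds a j = pvCnt ds a by
    intro j hj; exact H ds.length j (by omega) hj
  intro n
  induction n with
  | zero =>
    intro j hn hj
    have : ¬ j < ds.length := by omega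
    rw [pvAdvance, dif_neg this]
    omega
  | succ n ih =>
    intro j hn hj
    by_cases hlt : j < ds.length
    · rw [pvAdvance, dif_pos hlt]
      by_cases hja : ds[j] ≤ a
      · rw [if_pos hja]
        have : j < pvCnt ds a := (count_sorted_getElem a ds hpw j hlt).mp hja
        exact ih (j + 1) (by omega) (by omega)
      · rw [if_neg hja]
        have : ¬ j < pvCnt ds a := fun h => hja ((count_sorted_getElem a ds hpw j hlt).mpr h)
        omega
    · rw [pvAdvance, dif_neg hlt]
      omega

-- B's inner fold, on a sorted suffix, is a pvOptMax update by pvTP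
theorem bday_fold (sd : List Int) (hsd : sd.Pairwise (· ≤ ·)) :
    ∀ (suf : List Int), suf.Pairwise (· ≤ ·) → ∀ (i j : Nat) (b : Option Int),
    (∀ a ∈ suf, j ≤ pvCnt sd a) → suf ≠ [] →
    (suf.foldl
      (fun (s : Nat × Nat × Option Int) a =>
        let j := pvAdvance sd a s.2.1
        (s.1 + 1, j, some (pvOptMax s.2.2 ((s.1 : Int) + 1 - (j : Int)))))
      (i, j, b)).2.2
      = some (pvOptMax b (pvTP sd (i : Int) suf)) := by
  intro suf
  induction suf with
  | nil => intro _ i j b _ hne; exact absurd rfl hne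
  | cons a suf ih =>
    intro hpw i j b hj _
    rw [List.pairwise_cons] at hpw
    have hadv : pvAdvance sd a j = pvCnt sd a := pvAdvance_eq sd hsd a j (hj a (by simp))
    rw [List.foldl_cons]
    by_cases hsuf : suf = []
    · subst hsuf
      simp only [List.foldl_nil, hadv, pvTP]
    · obtain ⟨a', suf', rfl⟩ : ∃ a' suf', suf = a' :: suf' := by
        cases suf with
        | nil => exact absurd rfl hsuf
        | cons a' suf' => exact ⟨a', suf', rfl⟩
      have hj' : ∀ x ∈ a' :: suf', pvCnt sd a ≤ pvCnt sd x := by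
        intro x hx
        exact pvCnt_mono sd (hpw.1 x hx)
      simp only [hadv]
      rw [ih hpw.2 (i + 1) (pvCnt sd a) (some (pvOptMax b ((i : Int) + 1 - (pvCnt sd a : Int))))
        (fun x hx => hj' x hx) (by simp)]
      rw [pvOptMax_assoc]
      have : pvTP sd (i : Int) (a :: a' :: suf')
          = max ((i : Int) + 1 - (pvCnt sd a : Int)) (pvTP sd ((i : Int) + 1) (a' :: suf')) := by
        simp [pvTP]
      rw [this]
      norm_num

-- every arrival's occupancy is reached by the merge
theorem tp_ge (sd : List Int) :
    ∀ (sa : List Int), sa.Pairwise (· ≤ ·) → ∀ a ∈ sa, ∀ i : Int,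
      (pvCnt sa a : Int) + i - (pvCnt sd a : Int) ≤ pvTP sd i sa := by
  intro sa
  induction sa with
  | nil => intro _ a ha; simp at ha
  | cons a0 rest ih =>
    intro hpw a ha i
    rw [List.pairwise_cons] at hpw
    have h0 : a0 ≤ a := by
      rcases List.mem_cons.mp ha with h | h
      · omega
      · exact hpw.1 a h
    have hc : pvCnt (a0 :: rest) a = pvCnt rest a + 1 := by
      simp [pvCnt, h0]
    by_cases hrest : rest = []
    · subst hrest
      have : a = a0 := by simpa using ha
      subst this
      have h1 : pvCnt [a] a = 1 := by simp [pvCnt]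
      have h2 : (pvCnt ([] : List Int) a) = 0 := by simp [pvCnt]
      simp only [pvTP]
      omega
    · obtain ⟨r, rest', rfl⟩ : ∃ r rest', rest = r :: rest' := by
        cases rest with
        | nil => exact absurd rfl hrest
        | cons r rest' => exact ⟨r, rest', rfl⟩
      have htp : pvTP sd i (a0 :: r :: rest')
          = max (i + 1 - (pvCnt sd a0 : Int)) (pvTP sd (i + 1) (r :: rest')) := by
        simp [pvTP]
      rw [htp]
      by_cases ha' : a ∈ r :: rest'
      · have := ih hpw.2 a ha' (i + 1)
        rw [hc]
        push_cast
        omega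
      · have haa0 : a = a0 := by
          rcases List.mem_cons.mp ha with h | h
          · exact h
          · exact absurd h ha'
        have hr0 : pvCnt (r :: rest') a = 0 := by
          apply List.countP_eq_zero.mpr
          intro x hx
          simp only [decide_eq_true_eq]
          intro hxa
          have h1 := hpw.1 x hx
          have : x = a := by omega
          exact ha' (this ▸ hx)
        rw [hc, hr0, haa0]
        simp
        omega

-- and the merge never exceeds some arrival's occupancy
theorem tp_le (sd : List Int) (sa : List Int) (hsa : sa.Pairwise (· ≤ ·)) :
    ∀ (suf pre : List Int), sa = pre ++ suf → suf ≠ [] →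
      ∃ a ∈ sa, pvTP sd (pre.length : Int) suf ≤ (pvCnt sa a : Int) - (pvCnt sd a : Int) := by
  intro suf
  induction suf with
  | nil => intro pre _ hne; exact absurd rfl hne
  | cons a rest ih =>
    intro pre hsplit _
    have haS : a ∈ sa := by rw [hsplit]; simp
    have hkey : (pre.length : Int) + 1 ≤ (pvCnt sa a : Int) := by
      have hpre : ∀ x ∈ pre, x ≤ a := by
        rw [hsplit, List.pairwise_append] at hsa
        intro x hx
        exact hsa.2.2 x hx a (by simp)
      have h1 : pvCnt pre a = pre.length :=
        List.countP_eq_length.mpr (fun x hx => by simpa using hpre x hx)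
      have h2 : pvCnt sa a = pvCnt pre a + pvCnt (a :: rest) a := by
        rw [hsplit]; simp [pvCnt, List.countP_append]
      have h3 : 1 ≤ pvCnt (a :: rest) a := by
        simp [pvCnt]
      omega
    by_cases hrest : rest = []
    · subst hrest
      refine ⟨a, haS, ?_⟩
      simp only [pvTP]
      omega
    · obtain ⟨r, rest', rfl⟩ : ∃ r rest', rest = r :: rest' := by
        cases rest with
        | nil => exact absurd rfl hrest
        | cons r rest' => exact ⟨r, rest', rfl⟩
      have htp : pvTP sd (pre.length : Int) (a :: r :: rest')
          = max ((pre.length : Int) + 1 - (pvCnt sd a : Int))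
              (pvTP sd ((pre.length : Int) + 1) (r :: rest')) := by
        simp [pvTP]
      obtain ⟨a', ha', hb⟩ := ih (pre ++ [a]) (by rw [hsplit]; simp) (by simp)
      have hlen : ((pre ++ [a]).length : Int) = (pre.length : Int) + 1 := by
        simp
      rw [hlen] at hb
      rcases le_total ((pvCnt sa a : Int) - (pvCnt sd a : Int))
          ((pvCnt sa a' : Int) - (pvCnt sd a' : Int)) with h | h
      · exact ⟨a', ha', by rw [htp]; omega⟩
      · exact ⟨a, haS, by rw [htp]; omega⟩

-- counting transfer: the sorted per-day lists count exactly what pvG counts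
theorem pvCnt_arr (T : List (Int × Int × Int)) (c u : Int) :
    (pvCnt (PySem.List.sorted (((pvLc T c).map (fun t => t.2)).map (fun p => p.1)) (fun x => x)) u)
      = (pvLc T c).countP (fun t => decide (t.2.1 ≤ u)) := by
  unfold pvCnt
  rw [(PySem.List.sorted_perm (((pvLc T c).map (fun t => t.2)).map (fun p => p.1))
      (fun x => x) false).countP_eq]
  rw [List.map_map, List.countP_map]
  rfl

theorem pvCnt_dep (T : List (Int × Int × Int)) (c u : Int) :
    (pvCnt (PySem.List.sorted (((pvLc T c).map (fun t => t.2)).map (fun p => p.2)) (fun x => x)) u)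
      = (pvLc T c).countP (fun t => decide (t.2.2 ≤ u)) := by
  unfold pvCnt
  rw [(PySem.List.sorted_perm (((pvLc T c).map (fun t => t.2)).map (fun p => p.2))
      (fun x => x) false).countP_eq]
  rw [List.map_map, List.countP_map]
  rfl

-- per-day bounds for B, in pvG terms
theorem pvDayB_ge (T : List (Int × Int × Int)) (c : Int) :
    ∀ t ∈ pvLc T c, pvG (pvLc T c) (t.2.1) ≤ pvDayB ((pvLc T c).map (fun t => t.2)) := by
  intro t ht
  unfold pvDayB
  set sa := PySem.List.sorted (((pvLc T c).map (fun t => t.2)).map (fun p => p.1)) (fun x => x)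
  set sd := PySem.List.sorted (((pvLc T c).map (fun t => t.2)).map (fun p => p.2)) (fun x => x)
  have hsa : sa.Pairwise (· ≤ ·) := PySem.List.sorted_pairwise _ _
  have hmem : t.2.1 ∈ sa := by
    rw [PySem.List.mem_sorted]
    rw [List.map_map]
    exact List.mem_map_of_mem ht
  have := tp_ge sd sa hsa (t.2.1) hmem 0
  rw [pvCnt_arr, pvCnt_dep] at this
  unfold pvG
  omega

theorem pvDayB_le (T : List (Int × Int × Int)) (c : Int) (h : pvLc T c ≠ []) :
    ∃ t ∈ pvLc T c, pvDayB ((pvLc T c).map (fun t => t.2)) ≤ pvG (pvLc T c) (t.2.1) := by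
  unfold pvDayB
  set sa := PySem.List.sorted (((pvLc T c).map (fun t => t.2)).map (fun p => p.1)) (fun x => x)
    with hsadef
  set sd := PySem.List.sorted (((pvLc T c).map (fun t => t.2)).map (fun p => p.2)) (fun x => x)
  have hsa : sa.Pairwise (· ≤ ·) := PySem.List.sorted_pairwise _ _
  have hsane : sa ≠ [] := by
    rw [hsadef, ne_eq, PySem.List.sorted_eq_nil_iff]
    simp [h]
  obtain ⟨a, haS, hb⟩ := tp_le sd sa hsa sa [] rfl hsane
  rw [pvCnt_arr, pvCnt_dep] at hb
  have : a ∈ ((pvLc T c).map (fun t => t.2)).map (fun p => p.1) := by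
    rw [← PySem.List.mem_sorted (key := fun x => x) (rev := false)]
    exact haS
  rw [List.map_map, List.mem_map] at this
  obtain ⟨t, ht, hta⟩ := this
  have hta' : t.2.1 = a := by simpa using hta
  refine ⟨t, ht, ?_⟩
  simp only [List.length_nil, Nat.cast_zero] at hb
  unfold pvG
  rw [hta']
  omega

-- ---- assembling B's value ----

theorem B_best (T : List (Int × Int × Int)) :
    ((T.foldl (fun g t => g.modify t.1 [] (fun l => l ++ [t.2]))
        (PySem.Dict.empty : PySem.Dict Int (List (Int × Int)))).values.foldl
      (fun b pairs => pvDaySweep pairs b) none)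
    = (PySem.Set.ofList (T.map (fun t => t.1))).foldl
        (fun b c => some (pvOptMax b (pvDayB ((pvLc T c).map (fun t => t.2))))) none := by
  set g := T.foldl (fun g t => g.modify t.1 [] (fun l => l ++ [t.2]))
      (PySem.Dict.empty : PySem.Dict Int (List (Int × Int))) with hg
  have hnodup : g.keys.Nodup :=
    PySem.Dict.nodup_keys_foldl_modify_key T (fun t => t.1) []
      (fun _ t => fun l => l ++ [t.2]) PySem.Dict.empty PySem.Dict.nodup_keys_empty
  have hK : g.keys = PySem.Set.ofList (T.map (fun t => t.1)) := by
    rw [hg, PySem.Dict.keys_foldl_modify_key T (fun t => t.1) []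
      (fun _ t => fun l => l ++ [t.2]) PySem.Dict.empty]
    rw [PySem.Dict.keys_empty, PySem.Set.update_nil_left]
  have hvals : g.values = g.keys.map (fun c => g.getD c []) :=
    PySem.Dict.values_eq_map_keys g hnodup []
  rw [hvals, List.foldl_map, hK]
  apply PySem.List.foldl_congr_mem
  intro b c hc
  have hgetD : g.getD c [] = (pvLc T c).map (fun t => t.2) := by
    rw [hg, PySem.Dict.getD_foldl_modify_append T PySem.Dict.empty c, PySem.Dict.getD_empty]
    rfl
  have hLc : pvLc T c ≠ [] := by
    rw [PySem.Set.mem_ofList, List.mem_map] at hc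
    obtain ⟨t, htT, htc⟩ := hc
    exact List.ne_nil_of_mem (mem_pvLc_iff.mpr ⟨htT, htc⟩)
  rw [hgetD]
  unfold pvDaySweep pvDayB
  set sa := PySem.List.sorted (((pvLc T c).map (fun t => t.2)).map (fun p => p.1)) (fun x => x)
    with hsadef
  set sd := PySem.List.sorted (((pvLc T c).map (fun t => t.2)).map (fun p => p.2)) (fun x => x)
  have hsane : sa ≠ [] := by
    rw [hsadef, ne_eq, PySem.List.sorted_eq_nil_iff]
    simp [hLc]
  have := bday_fold sd (PySem.List.sorted_pairwise _ _) sa (PySem.List.sorted_pairwise _ _)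
    0 0 b (fun a _ => Nat.zero_le _) hsane
  simpa using this

-- ---- assembling A's value ----

-- ---- assembling A's value ----

theorem A_maxOcc (T : List (Int × Int × Int)) :
    ((T.foldl (fun sch t => sch.modify t.1 [] (fun l => l ++ [(t.2.1, 1), (t.2.2, -1)]))
        (PySem.Dict.empty : PySem.Dict Int (List (Int × Int)))).values.foldl
      (fun m evs =>
        ((PySem.List.sorted2 evs (fun p => p.1) (fun p => p.2)).foldl
          (fun (s : Int × Option Int) ev =>
            (s.1 + ev.2, some (pvOptMax s.2 (s.1 + ev.2)))) ((0 : Int), m)).2)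
      none)
    = (PySem.Set.ofList (T.map (fun t => t.1))).foldl
        (fun m c => some (pvOptMax m (pvDayMax (pvLc T c)))) none := by
  set sch := T.foldl (fun sch t => sch.modify t.1 [] (fun l => l ++ [(t.2.1, 1), (t.2.2, -1)]))
      (PySem.Dict.empty : PySem.Dict Int (List (Int × Int))) with hsch
  have hvals : sch.values = sch.keys.map (fun c => sch.getD c []) :=
    PySem.Dict.values_eq_map_keys sch (sched_nodup T) []
  have hK : sch.keys = PySem.Set.ofList (T.map (fun t => t.1)) := sched_keys T
  rw [hvals, List.foldl_map, hK]
  apply PySem.List.foldl_congr_mem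
  intro m c hc
  have hgetD : sch.getD c [] = pvEvents (pvLc T c) := by
    rw [hsch, sched_getD T PySem.Dict.empty c, PySem.Dict.getD_empty]
    simp
  have hLc : pvLc T c ≠ [] := by
    rw [PySem.Set.mem_ofList, List.mem_map] at hc
    obtain ⟨t, htT, htc⟩ := hc
    exact List.ne_nil_of_mem (mem_pvLc_iff.mpr ⟨htT, htc⟩)
  rw [hgetD]
  set S := PySem.List.sorted2 (pvEvents (pvLc T c)) (fun p => p.1) (fun p => p.2) false with hSdef
  have hSne : S ≠ [] := by
    intro h
    have hlen := (PySem.List.sorted2_perm (pvEvents (pvLc T c))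
        (fun p => p.1) (fun p => p.2) false).length_eq
    rw [hSdef] at h
    rw [h] at hlen
    exact pvEvents_ne_nil hLc (List.eq_nil_of_length_eq_zero hlen.symm)
  rw [inner_shape S 0 m, if_neg hSne]
  rfl

-- ===== final assembly =====

theorem ports_agree (arrival_times departure_times days : List Int) (number_of_platforms : Int) :
    can_run_all_trains arrival_times departure_times days number_of_platforms
      = can_run_all_trains_alt arrival_times departure_times days number_of_platforms := by
  simp only [can_run_all_trains, can_run_all_trains_alt]
  set T := days.zip (arrival_times.zip departure_times) with hT
  rw [A_maxOcc T, B_best T]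
  by_cases hTe : T = []
  · rw [hTe]
    rfl
  · set K := PySem.Set.ofList (T.map (fun t => t.1)) with hK
    have hKne : K ≠ [] := by
      obtain ⟨t, ht⟩ := List.exists_mem_of_ne_nil T hTe
      have : t.1 ∈ K := by
        rw [hK, PySem.Set.mem_ofList]
        exact List.mem_map_of_mem ht
      exact List.ne_nil_of_mem this
    have hnonempty : ∀ c ∈ K, pvLc T c ≠ [] := by
      intro c hc
      rw [hK, PySem.Set.mem_ofList, List.mem_map] at hc
      obtain ⟨t, htT, htc⟩ := hc
      exact List.ne_nil_of_mem (mem_pvLc_iff.mpr ⟨htT, htc⟩)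
    have hmemK : ∀ t ∈ T, t.1 ∈ K := by
      intro t ht
      rw [hK, PySem.Set.mem_ofList]
      exact List.mem_map_of_mem ht
    obtain ⟨rA, hfA, hbA, _, haA⟩ := ofold_spec (fun c => pvDayMax (pvLc T c)) K none hKne
    obtain ⟨rB, hfB, hbB, _, haB⟩ :=
      ofold_spec (fun c => pvDayB ((pvLc T c).map (fun t => t.2))) K none hKne
    rw [hfA, hfB]
    have hAB : rA ≤ rB := by
      rcases haA with ⟨c, hcK, hr⟩ | hr
      · obtain ⟨t, htLc, hle⟩ := pvDayMax_le (pvLc T c) (hnonempty c hcK)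
        have h2 := pvDayB_ge T c t htLc
        have h3 := hbB c hcK
        omega
      · exact absurd hr (by simp)
    have hBA : rB ≤ rA := by
      rcases haB with ⟨c, hcK, hr⟩ | hr
      · obtain ⟨t, htLc, hle⟩ := pvDayB_le T c (hnonempty c hcK)
        have h2 := pvDayMax_ge (pvLc T c) t htLc
        have h3 := hbA c hcK
        omega
      · exact absurd hr (by simp)
    have : rA = rB := le_antisymm hAB hBA
    rw [this]

-- ===== VERDICT (by name: the statement is the Claim_ definition above) =====
theorem can_run_all_trains_spec : Claim_equal_can_run_all_trains := by
  intro arrival_times departure_times days number_of_platforms _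
  unfold Spec_can_run_all_trains
  exact ports_agree arrival_times departure_times days number_of_platforms
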